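-- pv_equiv track=rewrite | github.com/dmedlin87/nashville-numbers | src/nashville_numbers/voicing.py | _build_voicing_from_bass
-- ===== SOURCE A (Python) =====
-- def _apply_drop(midis: list[int], style: str) -> list[int]:
--     """Apply drop-2 or drop-3 voicing to a sorted note list."""
--     if style == "drop2" and len(midis) >= 3:
--         midis[len(midis) - 2] -= 12
--         midis.sort()
--     elif style == "drop3" and len(midis) >= 4:
--         midis[len(midis) - 3] -= 12
--         midis.sort()
--     return midis
--
-- def _build_voicing_from_bass(ordered_pcs: list[int], style: str) -> list[int]:
--     """Build MIDI notes where the first pitch class is the lowest voice."""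
--     bass_pc = ordered_pcs[0]
--     base = 48 + bass_pc
--     midis = [base]
--
--     for pc in ordered_pcs[1:]:
--         midi = base + ((pc - bass_pc + 12) % 12)
--         while midi <= midis[-1]:
--             midi += 12
--         midis.append(midi)
--
--     midis = midis[:8]
--     return _apply_drop(midis, style)
-- ===== SOURCE B (Python) =====
-- def _build_voicing_from_bass(ordered_pcs: list[int], style: str) -> list[int]:
--     """Build MIDI notes where the first pitch class is the lowest voice.
--
--     Each voice is placed with one modular step: the smallest value strictly
--     above the previous voice congruent to 48 + pc (mod 12).  The drop voicing
--     is produced by rebuilding the list around the lowered note and sorting.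
--     """
--     voiced = [48 + ordered_pcs[0]]
--     for pc in ordered_pcs[1:]:
--         prev = voiced[-1]
--         voiced.append(prev + 1 + (48 + pc - prev - 1) % 12)
--     voiced = voiced[:8]
--     if style == "drop2" and len(voiced) >= 3:
--         voiced = sorted(voiced[:-2] + [voiced[-2] - 12, voiced[-1]])
--     elif style == "drop3" and len(voiced) >= 4:
--         voiced = sorted(voiced[:-3] + [voiced[-3] - 12] + voiced[-2:])
--     return voiced
-- ===== Notes on version B (the rewrite author's own statement) =====
-- stated objective: faster
-- what changed: B replaces A's inner `while midi <= midis[-1]: midi += 12` octave-lifting loop by a single closed-form modular step (prev + 1 + (48 + pc - prev - 1) % 12) and replaces _apply_drop's in-place index mutation + sort by rebuilding the list from slices around the lowered note and sorting.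
-- outside the precondition, e.g. on _build_voicing_from_bass([], 'drop2'): A raises IndexError, B raises IndexError
import Mathlib
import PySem

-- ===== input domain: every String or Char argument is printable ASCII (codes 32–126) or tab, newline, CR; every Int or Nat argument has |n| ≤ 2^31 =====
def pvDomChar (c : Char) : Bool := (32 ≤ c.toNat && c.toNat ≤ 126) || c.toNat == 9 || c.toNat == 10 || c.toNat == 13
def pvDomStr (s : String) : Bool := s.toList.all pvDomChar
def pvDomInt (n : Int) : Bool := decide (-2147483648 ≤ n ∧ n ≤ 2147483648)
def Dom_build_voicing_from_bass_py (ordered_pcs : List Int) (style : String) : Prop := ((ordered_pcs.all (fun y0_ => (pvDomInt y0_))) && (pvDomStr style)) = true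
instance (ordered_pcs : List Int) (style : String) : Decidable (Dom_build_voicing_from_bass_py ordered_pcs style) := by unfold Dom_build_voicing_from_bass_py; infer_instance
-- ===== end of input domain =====

-- B replaces A's inner octave-lifting `while` loop by a single closed-form modular step and A's
-- in-place drop mutation by rebuilding the list from slices around the lowered note (objective: faster, measured).

-- ===== PORT A =====

-- the inner `while midi <= midis[-1]: midi += 12` loop of A
def pvBump (midi prev : Int) : Int :=
  if midi ≤ prev then pvBump (midi + 12) prev else midi
termination_by (prev + 1 - midi).toNat
decreasing_by omega

-- _apply_drop: mutate the indexed element, then sort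
def pvApplyDrop (midis : List Int) (style : String) : List Int :=
  if style = "drop2" ∧ 3 ≤ midis.length then
    PySem.List.sorted (midis.set (midis.length - 2) (midis.getD (midis.length - 2) 0 - 12)) (fun x => x) false
  else if style = "drop3" ∧ 4 ≤ midis.length then
    PySem.List.sorted (midis.set (midis.length - 3) (midis.getD (midis.length - 3) 0 - 12)) (fun x => x) false
  else midis

def build_voicing_from_bass_py (ordered_pcs : List Int) (style : String) : List Int :=
  match PySem.List.pyGet? ordered_pcs 0 with
  | none => []   -- ordered_pcs[0] raises IndexError: excluded by Pre_
  | some bass_pc =>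
    let base := 48 + bass_pc
    let midis := (PySem.List.slice ordered_pcs (some 1) none).foldl
      (fun midis pc =>
        let midi := base + PySem.Int.mod (pc - bass_pc + 12) 12
        midis ++ [pvBump midi midis.getLast!]) [base]
    pvApplyDrop (PySem.List.slice midis none (some 8)) style

-- ===== PORT B =====
def build_voicing_from_bass_py_alt (ordered_pcs : List Int) (style : String) : List Int :=
  match PySem.List.pyGet? ordered_pcs 0 with
  | none => []   -- ordered_pcs[0] raises IndexError: excluded by Pre_
  | some pc0 =>
    let voiced := (PySem.List.slice ordered_pcs (some 1) none).foldl
      (fun voiced pc =>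
        let prev := voiced.getLast!
        voiced ++ [prev + 1 + PySem.Int.mod (48 + pc - prev - 1) 12]) [48 + pc0]
    let v := PySem.List.slice voiced none (some 8)
    if style = "drop2" ∧ 3 ≤ v.length then
      PySem.List.sorted
        (PySem.List.slice v none (some (-2)) ++
          [(PySem.List.pyGet? v (-2)).getD 0 - 12, (PySem.List.pyGet? v (-1)).getD 0])
        (fun x => x) false
    else if style = "drop3" ∧ 4 ≤ v.length then
      PySem.List.sorted
        (PySem.List.slice v none (some (-3)) ++
          [(PySem.List.pyGet? v (-3)).getD 0 - 12] ++ PySem.List.slice v (some (-2)) none)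
        (fun x => x) false
    else v

-- ===== PRECONDITION & SPEC =====
-- Pre_ excludes only the empty list, on which A raises IndexError at ordered_pcs[0].
def Pre_build_voicing_from_bass_py (ordered_pcs : List Int) (style : String) : Prop :=
  ordered_pcs ≠ []
instance (ordered_pcs : List Int) (style : String) : Decidable (Pre_build_voicing_from_bass_py ordered_pcs style) := by unfold Pre_build_voicing_from_bass_py; infer_instance

def pvWitness_build_voicing_from_bass_py : List Int × String := ([0, 4, 7, 11], "drop2")

def Spec_build_voicing_from_bass_py (ordered_pcs : List Int) (style : String) (out : List Int) : Prop := out = build_voicing_from_bass_py_alt ordered_pcs style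
instance (ordered_pcs : List Int) (style : String) (out : List Int) : Decidable (Spec_build_voicing_from_bass_py ordered_pcs style out) := by unfold Spec_build_voicing_from_bass_py; infer_instance

-- ===== CLAIM (what is proved, stated in full; the proofs are below) =====
def Claim_equal_build_voicing_from_bass_py : Prop := ∀ (ordered_pcs : List Int) (style : String), Dom_build_voicing_from_bass_py ordered_pcs style → Pre_build_voicing_from_bass_py ordered_pcs style → Spec_build_voicing_from_bass_py ordered_pcs style (build_voicing_from_bass_py ordered_pcs style)

-- ===== LEMMAS AND PROOFS =====

-- characterisation of the while loop: result is > prev (when entered), within one octave, ≡ midi (mod 12)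
theorem pvBump_spec (midi prev : Int) :
    midi ≤ pvBump midi prev ∧ 12 ∣ pvBump midi prev - midi ∧
    (midi ≤ prev → prev < pvBump midi prev ∧ pvBump midi prev ≤ prev + 12) ∧
    (prev < midi → pvBump midi prev = midi) := by
  induction midi using pvBump.induct (prev := prev) with
  | case1 midi h ih =>
    rw [pvBump, if_pos h]
    rcases ih with ⟨h1, h2, h3, h4⟩
    by_cases h' : midi + 12 ≤ prev
    · rcases h3 h' with ⟨h5, h6⟩; exact ⟨by omega, by omega, fun _ => ⟨h5, by omega⟩, by omega⟩
    · rw [h4 (by omega)] at *; exact ⟨by omega, by omega, fun _ => by omega, by omega⟩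
  | case2 midi h =>
    rw [pvBump, if_neg h]
    exact ⟨le_refl _, ⟨0, by ring⟩, by omega, fun _ => rfl⟩

-- one step of A's loop equals one step of B's loop, given prev ≥ base
theorem step_eq (bass pc prev : Int) (h : 48 + bass ≤ prev) :
    pvBump (48 + bass + PySem.Int.mod (pc - bass + 12) 12) prev
      = prev + 1 + PySem.Int.mod (48 + pc - prev - 1) 12 := by
  have hr1 := PySem.Int.mod_nonneg (pc - bass + 12) (b := 12) (by omega)
  have hr2 := PySem.Int.mod_lt (pc - bass + 12) (b := 12) (by omega)
  have hr3 := PySem.Int.floordiv_mul_add_mod (pc - bass + 12) 12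
  have hm1 := PySem.Int.mod_nonneg (48 + pc - prev - 1) (b := 12) (by omega)
  have hm2 := PySem.Int.mod_lt (48 + pc - prev - 1) (b := 12) (by omega)
  have hm3 := PySem.Int.floordiv_mul_add_mod (48 + pc - prev - 1) 12
  rcases pvBump_spec (48 + bass + PySem.Int.mod (pc - bass + 12) 12) prev with ⟨h1, h2, h3, h4⟩
  by_cases hc : 48 + bass + PySem.Int.mod (pc - bass + 12) 12 ≤ prev
  · rcases h3 hc with ⟨h5, h6⟩; omega
  · rw [h4 (by omega)]; omega

-- A's fold equals B's fold, for any nonempty accumulator whose last element is ≥ base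
theorem fold_eq (bass : Int) (rest : List Int) :
    ∀ (acc : List Int), acc ≠ [] → 48 + bass ≤ acc.getLast! →
    rest.foldl (fun midis pc =>
        midis ++ [pvBump (48 + bass + PySem.Int.mod (pc - bass + 12) 12) midis.getLast!]) acc
      = rest.foldl (fun voiced pc =>
        voiced ++ [voiced.getLast! + 1 + PySem.Int.mod (48 + pc - voiced.getLast! - 1) 12]) acc := by
  induction rest with
  | nil => intro acc _ _; rfl
  | cons pc rest ih =>
    intro acc hne hlast
    simp only [List.foldl_cons]
    have hstep := step_eq bass pc acc.getLast! hlast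
    have hlast' : (acc ++ [pvBump (48 + bass + PySem.Int.mod (pc - bass + 12) 12) acc.getLast!]).getLast!
        = pvBump (48 + bass + PySem.Int.mod (pc - bass + 12) 12) acc.getLast! := by
      simp [List.getLast!_eq_getLast?_getD]
    rw [hstep]
    refine ih _ (by simp) ?_
    rw [← hstep] at *
    rw [hlast']
    rcases pvBump_spec (48 + bass + PySem.Int.mod (pc - bass + 12) 12) acc.getLast! with ⟨h1, _, _, _⟩
    have := PySem.Int.mod_nonneg (pc - bass + 12) (b := 12) (by omega)
    omega

-- last-but-one rebuild: mutating index len-2 (resp. len-3) then reading slices gives the same list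
theorem set_eq_rebuild2 (l : List Int) (h : 3 ≤ l.length) :
    l.set (l.length - 2) (l.getD (l.length - 2) 0 - 12)
      = PySem.List.slice l none (some (-2)) ++
          [(PySem.List.pyGet? l (-2)).getD 0 - 12, (PySem.List.pyGet? l (-1)).getD 0] := by
  rw [PySem.List.slice_to_neg_ofNat l 2 (by omega),
      PySem.List.pyGet?_neg_ofNat l 2 (by omega) (by omega),
      PySem.List.pyGet?_neg_one, List.getLast?_eq_getElem?]
  apply List.ext_getElem
  · simp; omega
  · intro i hi1 hi2
    simp only [List.getElem_set, List.getD_eq_getElem?_getD, List.getElem?_eq_getElem (show l.length - 2 < l.length by omega), List.getElem?_eq_getElem (show l.length - 1 < l.length by omega), Option.getD_some]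
    rcases lt_trichotomy i (l.length - 2) with hc | hc | hc
    · rw [List.getElem_append_left (by simp; omega), List.getElem_take, if_neg (by omega)]
    · subst hc
      rw [if_pos rfl, List.getElem_append_right (by simp)]
      simp
    · have hieq : i = l.length - 1 := by simp at hi1; omega
      subst hieq
      rw [if_neg (by omega), List.getElem_append_right (by simp; omega)]
      have h2 : l.length - 1 - (List.take (l.length - 2) l).length = 1 := by simp; omega
      simp only [h2]
      rfl
theorem set_eq_rebuild3 (l : List Int) (h : 4 ≤ l.length) :
    l.set (l.length - 3) (l.getD (l.length - 3) 0 - 12)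
      = PySem.List.slice l none (some (-3)) ++
          [(PySem.List.pyGet? l (-3)).getD 0 - 12] ++ PySem.List.slice l (some (-2)) none := by
  rw [PySem.List.slice_to_neg_ofNat l 3 (by omega),
      PySem.List.pyGet?_neg_ofNat l 3 (by omega) (by omega),
      PySem.List.slice_from_neg_ofNat l 2 (by omega)]
  apply List.ext_getElem
  · simp; omega
  · intro i hi1 hi2
    simp only [List.getElem_set, List.getD_eq_getElem?_getD, List.getElem?_eq_getElem (show l.length - 3 < l.length by omega), Option.getD_some]
    rcases lt_trichotomy i (l.length - 3) with hc | hc | hc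
    · rw [List.getElem_append_left (by simp; omega), List.getElem_append_left (by simp; omega), List.getElem_take, if_neg (by omega)]
    · subst hc
      rw [List.getElem_append_left (by simp), List.getElem_append_right (by simp)]
      simp
    · rw [if_neg (by omega), List.getElem_append_right (by simp; omega), List.getElem_drop]
      congr 1
      simp; omega

-- ===== VERDICT (by name: the statement is the Claim_ definition above) =====
theorem build_voicing_from_bass_py_spec : Claim_equal_build_voicing_from_bass_py := by
  intro ordered_pcs style _ hpre
  unfold Spec_build_voicing_from_bass_py
  unfold build_voicing_from_bass_py build_voicing_from_bass_py_alt
  cases ordered_pcs with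
  | nil => exact absurd rfl hpre
  | cons pc0 rest =>
    simp only [PySem.List.pyGet?_zero_cons, PySem.List.slice_from_one, List.tail_cons]
    rw [fold_eq pc0 rest [48 + pc0] (by simp) (by simp [List.getLast!_eq_getLast?_getD])]
    generalize (rest.foldl (fun voiced pc =>
        voiced ++ [voiced.getLast! + 1 + PySem.Int.mod (48 + pc - voiced.getLast! - 1) 12]) [48 + pc0]) = M
    generalize PySem.List.slice M none (some 8) = v
    unfold pvApplyDrop
    split_ifs with h1 h2
    · rw [set_eq_rebuild2 v h1.2]
    · rw [set_eq_rebuild3 v h2.2]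
    · rfl
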